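-- pv_equiv track=rewrite | github.com/trevensa/mbti | interface_botoes/interface_botoes.py | escolheDominante
-- ===== SOURCE A (Python) =====
-- def escolheDominante(funcoes):
--
--     dominantes = []
--
--     pos = max(funcoes, key = lambda k: funcoes[k])
--     maior_valor = funcoes[pos]
--
--     for item in funcoes:
--
--         if funcoes[item] == maior_valor:
--
--             dominantes.append(item)
--
--     return dominantes
-- ===== SOURCE B (Python) =====
-- def escolheDominante(funcoes):
--
--     groups = {}
--
--     for chave in funcoes:
--         groups.setdefault(funcoes[chave], []).append(chave)
--
--     maior = max(groups)
--
--     return groups[maior]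
-- ===== Notes on version B (the rewrite author's own statement) =====
-- stated objective: alternative
-- what changed: Replaces A's two passes (max over keys by value, then a filtering scan) by a single grouping pass building an inverted index value -> list of keys, then returning the bucket of the maximal value.
import Mathlib
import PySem

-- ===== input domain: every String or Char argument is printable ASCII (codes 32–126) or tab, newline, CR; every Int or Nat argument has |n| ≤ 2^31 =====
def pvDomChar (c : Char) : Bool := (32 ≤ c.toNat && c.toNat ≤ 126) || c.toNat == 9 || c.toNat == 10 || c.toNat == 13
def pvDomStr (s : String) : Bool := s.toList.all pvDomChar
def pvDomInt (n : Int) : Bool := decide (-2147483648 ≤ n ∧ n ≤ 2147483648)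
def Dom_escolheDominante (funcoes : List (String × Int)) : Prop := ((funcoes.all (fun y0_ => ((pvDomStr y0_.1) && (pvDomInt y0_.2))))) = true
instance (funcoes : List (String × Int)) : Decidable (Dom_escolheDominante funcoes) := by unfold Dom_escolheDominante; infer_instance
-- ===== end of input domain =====

-- B builds an inverted index (value -> keys in order) in one pass and returns the bucket of the
-- maximal value, instead of A's max-by-value pass followed by a filtering pass: alternative algorithm.


-- ===== PORT A =====
def escolheDominante (funcoes : List (String × Int)) : List String :=
  let d := PySem.Dict.mk funcoes
  -- pos = max(funcoes, key = lambda k: funcoes[k])  (ValueError on an empty dict: excluded by Pre_)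
  match PySem.List.max? d.keys (fun k => d.getD k 0) with
  | none => []
  | some pos =>
    let maior_valor := d.getD pos 0
    d.keys.foldl (fun dominantes item =>
      if d.getD item 0 == maior_valor then dominantes ++ [item] else dominantes) []

-- ===== PORT B =====
def escolheDominante_alt (funcoes : List (String × Int)) : List String :=
  let d := PySem.Dict.mk funcoes
  let groups : PySem.Dict Int (List String) :=
    d.keys.foldl (fun g chave =>
      g.modify (d.getD chave 0) ([] : List String) (fun l => l ++ [chave])) PySem.Dict.empty
  -- maior = max(groups)  (ValueError on an empty dict: excluded by Pre_)
  match PySem.List.max? groups.keys (fun v => v) with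
  | none => []
  | some maior => groups.getD maior []

-- ===== PRECONDITION & SPEC =====
-- A (and B) raise ValueError (max of an empty sequence) exactly on the empty dict.
def Pre_escolheDominante (funcoes : List (String × Int)) : Prop := funcoes ≠ []
instance (funcoes : List (String × Int)) : Decidable (Pre_escolheDominante funcoes) := by unfold Pre_escolheDominante; infer_instance
def pvWitness_escolheDominante : (List (String × Int)) := [("a", 2), ("b", 1), ("c", 2)]

def Spec_escolheDominante (funcoes : List (String × Int)) (out : List String) : Prop := out = escolheDominante_alt funcoes
instance (funcoes : List (String × Int)) (out : List String) : Decidable (Spec_escolheDominante funcoes out) := by unfold Spec_escolheDominante; infer_instance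

-- ===== CLAIM (what is proved, stated in full; the proofs are below) =====
def Claim_equal_escolheDominante : Prop := ∀ (funcoes : List (String × Int)), Dom_escolheDominante funcoes → Pre_escolheDominante funcoes → Spec_escolheDominante funcoes (escolheDominante funcoes)

-- ===== LEMMAS AND PROOFS =====

-- B's grouping loop: its key set is the (deduplicated) value list, and each bucket is the
-- in-order filter of the keys having that value.
theorem pv_groups_keys (keys : List String) (f : String → Int) :
    ((keys.foldl (fun g chave =>
        g.modify (f chave) ([] : List String) (fun l => l ++ [chave])) PySem.Dict.empty).keys)
      = PySem.Set.ofList (keys.map f) := by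
  rw [PySem.Dict.keys_foldl_modify_key (key := f)
    (f := fun (_ : PySem.Dict Int (List String)) chave => fun l => l ++ [chave])]
  simp [PySem.Set.update, PySem.Set.ofList_eq_foldl]

theorem pv_groups_getD (keys : List String) (f : String → Int) (v : Int) :
    ((keys.foldl (fun g chave =>
        g.modify (f chave) ([] : List String) (fun l => l ++ [chave])) PySem.Dict.empty).getD v [])
      = keys.filter (fun k => f k == v) := by
  have h := PySem.Dict.getD_foldl_modify_append
    (l := keys.map (fun c => (f c, c))) (d := (PySem.Dict.empty : PySem.Dict Int (List String))) (c := v)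
  rw [List.foldl_map] at h
  simpa [List.filter_map, Function.comp_def, List.map_id'] using h

theorem escolheDominante_eq (funcoes : List (String × Int)) (h : funcoes ≠ []) :
    escolheDominante funcoes = escolheDominante_alt funcoes := by
  simp only [escolheDominante, escolheDominante_alt]
  set d := PySem.Dict.mk funcoes with hd
  set f : String → Int := fun k => d.getD k 0 with hf
  have hkeys : d.keys ≠ [] := by
    simp only [hd, PySem.Dict.keys_mk]
    exact fun hn => h (List.map_eq_nil_iff.mp hn)
  -- A's max
  obtain ⟨pos, hpos⟩ : ∃ pos, PySem.List.max? d.keys f = some pos := by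
    cases hm : PySem.List.max? d.keys f with
    | none =>
      rw [PySem.List.max?_eq_none_iff] at hm
      exact absurd hm hkeys
    | some p => exact ⟨p, rfl⟩
  have hposmem : pos ∈ d.keys := PySem.List.max?_mem hpos
  have hposmax : ∀ y ∈ d.keys, f y ≤ f pos := PySem.List.max?_isMax hpos
  -- B's groups
  rw [pv_groups_keys d.keys f]
  rw [hpos]
  have hvmem : f pos ∈ PySem.Set.ofList (d.keys.map f) := by
    rw [PySem.Set.mem_ofList]; exact List.mem_map_of_mem hposmem
  obtain ⟨maior, hmai⟩ : ∃ m, PySem.List.max? (PySem.Set.ofList (d.keys.map f)) (fun v => v) = some m := by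
    cases hm : PySem.List.max? (PySem.Set.ofList (d.keys.map f)) (fun v => v) with
    | none =>
      rw [PySem.List.max?_eq_none_iff] at hm
      rw [hm] at hvmem; exact absurd hvmem (List.not_mem_nil)
    | some m => exact ⟨m, rfl⟩
  have hmaimem : maior ∈ d.keys.map f := by
    have := PySem.List.max?_mem hmai
    rwa [PySem.Set.mem_ofList] at this
  have hmaimax : ∀ v ∈ PySem.Set.ofList (d.keys.map f), v ≤ maior := PySem.List.max?_isMax hmai
  -- the two maxima coincide
  have heq : maior = f pos := by
    obtain ⟨k, hk, hfk⟩ := List.mem_map.mp hmaimem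
    exact le_antisymm (hfk ▸ hposmax k hk) (hmaimax _ hvmem)
  rw [hmai]
  simp only []
  rw [pv_groups_getD d.keys f maior, heq,
    PySem.List.foldl_append_if_eq_filter (p := fun item => f item == f pos)]
  simp

-- ===== VERDICT (by name: the statement is the Claim_ definition above) =====
theorem escolheDominante_spec : Claim_equal_escolheDominante := by
  intro funcoes _ hpre
  unfold Spec_escolheDominante
  exact escolheDominante_eq funcoes hpre
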